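-- pv_equiv track=rewrite | github.com/QuBenhao/LeetCode | problems/problems_1856/solution.py | maxSumMinProduct
-- ===== SOURCE A (Python) =====
-- def maxSumMinProduct(nums):
--     """
--     :type nums: List[int]
--     :rtype: int
--     """
--     mod = 10 ** 9 + 7
--     n = len(nums)
--     presum = [0] * (n+1)
--     for i in range(n):
--         # sum(i,j) = presum[j+1] - presum[i]
--         presum[i+1] = presum[i] + nums[i]
--
--     # 双向单调栈
--     # 左边第一个比i小的下标
--     left = [-1] * n
--     # 右边第一个比i小的下标
--     right = [n] * n
--
--     # 单调栈
--     stack = []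
--     for i in range(n):
--         # 单调递增栈
--         while stack and nums[i] < nums[stack[-1]]:
--             # 当前元素比栈中最后一个元素小，那么栈中最后一个元素右边第一个比它小的就是当前元素了
--             right[stack.pop()] = i
--         stack.append(i)
--
--     stack = []
--     for i in range(n-1, -1, -1):
--         # 单调递增栈
--         while stack and nums[i] < nums[stack[-1]]:
--             # 当前元素比栈中最后一个元素小，那么栈中最后一个元素左边第一个比它小的就是当前元素了
--             left[stack.pop()] = i
--         stack.append(i)
--
--     res = 0
--     for i in range(n):
--         res = max(res, nums[i] * (presum[right[i]] - presum[left[i]+1]))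
--     return res % mod
-- ===== SOURCE B (Python) =====
-- def maxSumMinProduct(nums):
--     mod = 10 ** 9 + 7
--     n = len(nums)
--     presum = [0] * (n + 1)
--     for i in range(n):
--         presum[i + 1] = presum[i] + nums[i]
--     res = 0
--     for i in range(n):
--         l = i - 1
--         while l >= 0 and nums[l] >= nums[i]:
--             l -= 1
--         r = i + 1
--         while r < n and nums[r] >= nums[i]:
--             r += 1
--         res = max(res, nums[i] * (presum[r] - presum[l + 1]))
--     return res % mod
-- ===== Notes on version B (the rewrite author's own statement) =====
-- stated objective: simpler
-- what changed: Replaced the two monotonic-stack boundary passes (and the mutable left/right arrays they fill) by a direct per-element while-loop scan for the nearest strictly smaller element on each side; the prefix-sum array and the final max/mod are kept.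
import Mathlib
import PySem

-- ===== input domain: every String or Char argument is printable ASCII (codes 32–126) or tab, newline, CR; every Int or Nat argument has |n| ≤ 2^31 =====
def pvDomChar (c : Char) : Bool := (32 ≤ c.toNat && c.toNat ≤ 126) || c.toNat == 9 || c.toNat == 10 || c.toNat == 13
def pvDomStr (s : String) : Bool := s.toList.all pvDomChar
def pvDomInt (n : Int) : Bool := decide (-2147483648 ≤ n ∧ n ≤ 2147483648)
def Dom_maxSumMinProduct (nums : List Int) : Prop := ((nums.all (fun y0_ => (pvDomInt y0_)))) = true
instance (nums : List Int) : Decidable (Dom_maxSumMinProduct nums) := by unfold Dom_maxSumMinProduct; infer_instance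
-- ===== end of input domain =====

-- B replaces A's two monotonic-stack boundary passes by a direct per-element
-- boundary scan (no stacks): simpler, same return value on every input.

-- ===== PORT A =====

-- shared helper: the prefix-sum loop, identical lines in A and B
def presumOf (nums : List Int) : List Int :=
  (List.range nums.length).foldl
    (fun ps i => ps.set (i + 1) (ps.getD i 0 + nums.getD i 0))
    (List.replicate (nums.length + 1) 0)

-- the inner `while stack and nums[i] < nums[stack[-1]]` loop of the forward pass
def popR (nums : List Int) (i : Nat) : List Nat → List Nat → List Nat × List Nat
  | [], right => ([], right)
  | j :: st, right =>
      if nums.getD i 0 < nums.getD j 0 then popR nums i st (right.set j i)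
      else (j :: st, right)

-- the inner while loop of the backward pass
def popL (nums : List Int) (i : Nat) : List Nat → List Int → List Nat × List Int
  | [], left => ([], left)
  | j :: st, left =>
      if nums.getD i 0 < nums.getD j 0 then popL nums i st (left.set j (i : Int))
      else (j :: st, left)

def maxSumMinProduct (nums : List Int) : Int :=
  let mod : Int := 10 ^ 9 + 7
  let n := nums.length
  let presum := presumOf nums
  let right :=
    ((List.range n).foldl
      (fun (p : List Nat × List Nat) i =>
        let q := popR nums i p.1 p.2
        (i :: q.1, q.2))
      ([], List.replicate n n)).2
  let left :=
    ((List.range n).reverse.foldl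
      (fun (p : List Nat × List Int) i =>
        let q := popL nums i p.1 p.2
        (i :: q.1, q.2))
      ([], List.replicate n (-1))).2
  let res :=
    (List.range n).foldl
      (fun res i =>
        max res (nums.getD i 0 *
          (presum.getD (right.getD i n) 0 - presum.getD (left.getD i (-1) + 1).toNat 0)))
      0
  PySem.Int.mod res mod

-- ===== PORT B =====

-- `l = i-1; while l >= 0 and nums[l] >= nums[i]: l -= 1`
def scanL (nums : List Int) (x : Int) : Nat → Int
  | 0 => -1
  | k + 1 => if nums.getD k 0 ≥ x then scanL nums x k else (k : Int)

-- `r = i+1; while r < n and nums[r] >= nums[i]: r += 1`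
def scanR (nums : List Int) (x : Int) (r : Nat) : Nat :=
  if r < nums.length then
    (if nums.getD r 0 ≥ x then scanR nums x (r + 1) else r)
  else r
termination_by nums.length - r

def maxSumMinProduct_alt (nums : List Int) : Int :=
  let mod : Int := 10 ^ 9 + 7
  let n := nums.length
  let presum := presumOf nums
  let res :=
    (List.range n).foldl
      (fun res i =>
        let l := scanL nums (nums.getD i 0) i
        let r := scanR nums (nums.getD i 0) (i + 1)
        max res (nums.getD i 0 * (presum.getD r 0 - presum.getD (l + 1).toNat 0)))
      0
  PySem.Int.mod res mod

-- ===== PRECONDITION & SPEC =====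
def Spec_maxSumMinProduct (nums : List Int) (out : Int) : Prop := out = maxSumMinProduct_alt nums
instance (nums : List Int) (out : Int) : Decidable (Spec_maxSumMinProduct nums out) := by unfold Spec_maxSumMinProduct; infer_instance

-- ===== CLAIM (what is proved, stated in full; the proofs are below) =====
def Claim_equal_maxSumMinProduct : Prop := ∀ (nums : List Int), Dom_maxSumMinProduct nums → Spec_maxSumMinProduct nums (maxSumMinProduct nums)

-- ===== LEMMAS AND PROOFS =====

-- abbreviation used throughout the proofs
def nval (nums : List Int) (i : Nat) : Int := nums.getD i 0

-- characterization of scanR ------------------------------------------------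
theorem scanR_eq_of (nums : List Int) (x : Int) (r m : Nat)
    (hrm : r ≤ m) (hmn : m < nums.length)
    (hgt : ∀ k, r ≤ k → k < m → x ≤ nval nums k)
    (hlt : nval nums m < x) : scanR nums x r = m := by
  simp only [nval] at *
  revert hrm hgt
  generalize hD : m - r = d
  induction d generalizing r with
  | zero =>
      intro hrm hgt
      have hrmeq : r = m := by omega
      subst hrmeq
      unfold scanR
      rw [if_pos (by omega : r < nums.length), if_neg (not_le.mpr hlt)]
  | succ d ih =>
      intro hrm hgt
      by_cases hrmeq : r = m
      · subst hrmeq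
        unfold scanR
        rw [if_pos (by omega : r < nums.length), if_neg (not_le.mpr hlt)]
      · have hrm' : r < m := lt_of_le_of_ne hrm hrmeq
        unfold scanR
        rw [if_pos (by omega : r < nums.length), if_pos (hgt r (le_refl _) hrm')]
        exact ih (r + 1) (by omega) (by omega) (fun k hk hk' => hgt k (by omega) hk')

theorem scanR_eq_len (nums : List Int) (x : Int) (r : Nat)
    (hr0 : r ≤ nums.length)
    (hgt : ∀ k, r ≤ k → k < nums.length → x ≤ nval nums k) :
    scanR nums x r = nums.length := by
  simp only [nval] at *
  revert hr0 hgt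
  generalize hD : nums.length - r = d
  induction d generalizing r with
  | zero =>
      intro hr0 hgt
      unfold scanR
      rw [if_neg (by omega : ¬ r < nums.length)]
      omega
  | succ d ih =>
      intro hr0 hgt
      have hr : r < nums.length := by omega
      unfold scanR
      rw [if_pos hr, if_pos (hgt r (le_refl _) hr)]
      exact ih (r + 1) (by omega) (by omega) (fun k hk hk' => hgt k (by omega) hk')

-- characterization of scanL ------------------------------------------------
theorem scanL_eq_of (nums : List Int) (x : Int) (i m : Nat)
    (hmi : m < i)
    (hgt : ∀ k, m < k → k < i → x ≤ nval nums k)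
    (hlt : nval nums m < x) : scanL nums x i = (m : Int) := by
  simp only [nval] at *
  induction i with
  | zero => omega
  | succ k ih =>
      unfold scanL
      by_cases hkm : k = m
      · subst hkm
        rw [if_neg (not_le.mpr hlt)]
      · rw [if_pos (hgt k (by omega) (by omega))]
        exact ih (by omega) (fun k' h1 h2 => hgt k' h1 (by omega))

theorem scanL_eq_neg (nums : List Int) (x : Int) (i : Nat)
    (hgt : ∀ k, k < i → x ≤ nval nums k) :
    scanL nums x i = -1 := by
  simp only [nval] at *
  induction i with
  | zero => rfl
  | succ k ih =>
      unfold scanL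
      rw [if_pos (hgt k (by omega))]
      exact ih (fun k' h => hgt k' (by omega))

-- invariant of the forward stack pass --------------------------------------
structure GoodR (nums : List Int) (i : Nat) (st : List Nat) (right : List Nat) : Prop where
  sorted : st.Pairwise (· > ·)
  ub : ∀ j ∈ st, j < i
  noSmaller : ∀ j ∈ st, ∀ k, j < k → k < i → nval nums j ≤ nval nums k
  complete : ∀ j, j < i → (∀ k, j < k → k < i → nval nums j ≤ nval nums k) → j ∈ st
  len : right.length = nums.length
  done : ∀ j, j < i → j ∉ st → right.getD j nums.length = scanR nums (nval nums j) (j + 1)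
  inStack : ∀ j ∈ st, right.getD j nums.length = nums.length
  fresh : ∀ j, i ≤ j → j < nums.length → right.getD j nums.length = nums.length

theorem popR_spec (nums : List Int) (i : Nat) (hi : i < nums.length) :
    ∀ (st : List Nat) (right : List Nat),
      st.Pairwise (· > ·) → (∀ j ∈ st, j < i) →
      (∀ j ∈ st, ∀ k, j < k → k < i → nval nums j ≤ nval nums k) →
      right.length = nums.length →
      (∀ j, j < i → j ∉ st → right.getD j nums.length = scanR nums (nval nums j) (j + 1)) →
      (∀ j ∈ st, right.getD j nums.length = nums.length) →
      (∀ j, i ≤ j → j < nums.length → right.getD j nums.length = nums.length) →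
      ((popR nums i st right).1 <:+ st) ∧
      (∀ j ∈ st, j ∉ (popR nums i st right).1 → nval nums i < nval nums j) ∧
      (∀ j ∈ (popR nums i st right).1, nval nums j ≤ nval nums i) ∧
      (popR nums i st right).2.length = nums.length ∧
      (∀ j, j < i → j ∉ (popR nums i st right).1 →
        (popR nums i st right).2.getD j nums.length = scanR nums (nval nums j) (j + 1)) ∧
      (∀ j ∈ (popR nums i st right).1, (popR nums i st right).2.getD j nums.length = nums.length) ∧
      (∀ j, i ≤ j → j < nums.length → (popR nums i st right).2.getD j nums.length = nums.length) := by
  intro st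
  induction st with
  | nil =>
      intro right _ _ _ hlen hdone hin hfresh
      simp only [popR]
      exact ⟨List.suffix_refl _, by simp, by simp, hlen, hdone, by simp, hfresh⟩
  | cons j st ih =>
      intro right hsorted hub hnos hlen hdone hin hfresh
      have hjst : ∀ a ∈ st, a < j := fun a ha => (List.pairwise_cons.mp hsorted).1 a ha
      have hji : j < i := hub j (List.mem_cons_self ..)
      by_cases hpop : nums.getD i 0 < nums.getD j 0
      · -- pop j, recurse on st with right.set j i
        have hstep : popR nums i (j :: st) right = popR nums i st (right.set j i) := by
          simp only [popR, if_pos hpop]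
        rw [hstep]
        have hjlen : j < right.length := by omega
        have hset_self : (right.set j i).getD j nums.length = i := by
          simp [List.getD, hjlen]
        have hset_other : ∀ m, m ≠ j → (right.set j i).getD m nums.length = right.getD m nums.length := by
          intro m hm
          simp [List.getD, List.getElem?_set_ne (by omega : j ≠ m)]
        have hscanj : scanR nums (nval nums j) (j + 1) = i :=
          scanR_eq_of nums (nval nums j) (j + 1) i (by omega) hi
            (fun k hk hk' => hnos j (List.mem_cons_self ..) k (by omega) hk')
            (by simpa [nval] using hpop)
        obtain ⟨c1, c2, c3, c4, c5, c6, c7⟩ :=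
          ih (right.set j i)
            (List.pairwise_cons.mp hsorted).2
            (fun a ha => hub a (List.mem_cons_of_mem _ ha))
            (fun a ha => hnos a (List.mem_cons_of_mem _ ha))
            (by simpa using hlen)
            (by
              intro m hm hmst
              by_cases hmj : m = j
              · subst hmj
                rw [hset_self, hscanj]
              · rw [hset_other m hmj]
                exact hdone m hm (by simp [hmj, hmst])
            )
            (by
              intro a ha
              rw [hset_other a (fun h => absurd (h ▸ ha) (fun hmem => lt_irrefl j (hjst j hmem)))]
              exact hin a (List.mem_cons_of_mem _ ha))
            (by
              intro m hm hm'
              rw [hset_other m (by omega)]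
              exact hfresh m hm hm')
        have hjnot : j ∉ (popR nums i st (right.set j i)).1 := by
          intro hmem
          exact lt_irrefl j (hjst j (c1.subset hmem))
        refine ⟨c1.trans (List.suffix_cons j st), ?_, c3, c4, c5, c6, c7⟩
        intro a ha hanot
        rcases List.mem_cons.mp ha with h | h
        · subst h; simpa [nval] using hpop
        · exact c2 a h hanot
      · -- stop: stack unchanged
        have hstep : popR nums i (j :: st) right = (j :: st, right) := by
          simp only [popR, if_neg hpop]
        rw [hstep]
        refine ⟨List.suffix_refl _, ?_, ?_, hlen, hdone, hin, hfresh⟩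
        · intro a ha hanot; exact absurd ha hanot
        · intro a ha
          rcases List.mem_cons.mp ha with h | h
          · subst h; simpa [nval] using not_lt.mp hpop
          · calc nval nums a ≤ nval nums j := hnos a ha j (hjst a h) hji
              _ ≤ nval nums i := by simpa [nval] using not_lt.mp hpop

theorem goodR_final (nums : List Int) (st right : List Nat)
    (h : GoodR nums nums.length st right) :
    ∀ j, j < nums.length → right.getD j nums.length = scanR nums (nval nums j) (j + 1) := by
  intro j hj
  by_cases hmem : j ∈ st
  · rw [h.inStack j hmem,
      scanR_eq_len nums (nval nums j) (j + 1) (by omega)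
        (fun k hk hk' => h.noSmaller j hmem k (by omega) hk')]
  · exact h.done j hj hmem

theorem goodR_step (nums : List Int) (i : Nat) (st right : List Nat)
    (h : GoodR nums i st right) (hi : i < nums.length) :
    GoodR nums (i + 1) (i :: (popR nums i st right).1) (popR nums i st right).2 := by
  obtain ⟨c1, c2, c3, c4, c5, c6, c7⟩ :=
    popR_spec nums i hi st right h.sorted h.ub h.noSmaller h.len h.done h.inStack h.fresh
  have hsub : ∀ a ∈ (popR nums i st right).1, a ∈ st := fun a ha => c1.subset ha
  refine ⟨?_, ?_, ?_, ?_, c4, ?_, ?_, ?_⟩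
  · exact List.pairwise_cons.mpr ⟨fun a ha => h.ub a (hsub a ha), h.sorted.sublist c1.sublist⟩
  · intro a ha
    rcases List.mem_cons.mp ha with rfl | hh
    · omega
    · have := h.ub a (hsub a hh); omega
  · intro j hj k hk hk'
    rcases List.mem_cons.mp hj with rfl | hh
    · omega
    · by_cases hki : k = i
      · subst hki; exact c3 j hh
      · exact h.noSmaller j (hsub j hh) k hk (by omega)
  · intro j hj hprop
    by_cases hji : j = i
    · subst hji; exact List.mem_cons_self ..
    · have hji' : j < i := by omega
      have hst : j ∈ st := h.complete j hji' (fun k h1 h2 => hprop k h1 (by omega))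
      by_cases hq : j ∈ (popR nums i st right).1
      · exact List.mem_cons_of_mem _ hq
      · exact absurd (hprop i hji' (by omega)) (not_le.mpr (c2 j hst hq))
  · intro j hj hnot
    have hji : j ≠ i := fun hh => hnot (hh ▸ List.mem_cons_self ..)
    exact c5 j (by omega) (fun hh => hnot (List.mem_cons_of_mem _ hh))
  · intro j hj
    rcases List.mem_cons.mp hj with rfl | hh
    · exact c7 j (le_refl _) hi
    · exact c6 j hh
  · intro j hj hj'
    exact c7 j (by omega) hj' 

-- invariant of the backward stack pass -------------------------------------
structure GoodL (nums : List Int) (i : Nat) (st : List Nat) (left : List Int) : Prop where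
  sorted : st.Pairwise (· < ·)
  lb : ∀ j ∈ st, i ≤ j ∧ j < nums.length
  noSmaller : ∀ j ∈ st, ∀ k, i ≤ k → k < j → nval nums j ≤ nval nums k
  complete : ∀ j, i ≤ j → j < nums.length → (∀ k, i ≤ k → k < j → nval nums j ≤ nval nums k) → j ∈ st
  len : left.length = nums.length
  done : ∀ j, i ≤ j → j < nums.length → j ∉ st → left.getD j (-1) = scanL nums (nval nums j) j
  inStack : ∀ j ∈ st, left.getD j (-1) = -1
  fresh : ∀ j, j < i → left.getD j (-1) = -1

theorem popL_spec (nums : List Int) (i : Nat) (_hi : i < nums.length) :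
    ∀ (st : List Nat) (left : List Int),
      st.Pairwise (· < ·) → (∀ j ∈ st, i + 1 ≤ j ∧ j < nums.length) →
      (∀ j ∈ st, ∀ k, i + 1 ≤ k → k < j → nval nums j ≤ nval nums k) →
      left.length = nums.length →
      (∀ j, i + 1 ≤ j → j < nums.length → j ∉ st → left.getD j (-1) = scanL nums (nval nums j) j) →
      (∀ j ∈ st, left.getD j (-1) = -1) →
      (∀ j, j < i + 1 → left.getD j (-1) = -1) →
      ((popL nums i st left).1 <:+ st) ∧
      (∀ j ∈ st, j ∉ (popL nums i st left).1 → nval nums i < nval nums j) ∧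
      (∀ j ∈ (popL nums i st left).1, nval nums j ≤ nval nums i) ∧
      (popL nums i st left).2.length = nums.length ∧
      (∀ j, i + 1 ≤ j → j < nums.length → j ∉ (popL nums i st left).1 →
        (popL nums i st left).2.getD j (-1) = scanL nums (nval nums j) j) ∧
      (∀ j ∈ (popL nums i st left).1, (popL nums i st left).2.getD j (-1) = -1) ∧
      (∀ j, j < i + 1 → (popL nums i st left).2.getD j (-1) = -1) := by
  intro st
  induction st with
  | nil =>
      intro left _ _ _ hlen hdone hin hfresh
      simp only [popL]
      exact ⟨List.suffix_refl _, by simp, by simp, hlen, hdone, by simp, hfresh⟩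
  | cons j st ih =>
      intro left hsorted hlb hnos hlen hdone hin hfresh
      have hjst : ∀ a ∈ st, j < a := fun a ha => (List.pairwise_cons.mp hsorted).1 a ha
      have hji : i + 1 ≤ j ∧ j < nums.length := hlb j (List.mem_cons_self ..)
      by_cases hpop : nums.getD i 0 < nums.getD j 0
      · have hstep : popL nums i (j :: st) left = popL nums i st (left.set j (i : Int)) := by
          simp only [popL, if_pos hpop]
        rw [hstep]
        have hjlen : j < left.length := by omega
        have hset_self : (left.set j (i : Int)).getD j (-1) = (i : Int) := by
          simp [List.getD, hjlen]
        have hset_other : ∀ m, m ≠ j → (left.set j (i : Int)).getD m (-1) = left.getD m (-1) := by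
          intro m hm
          simp [List.getD, List.getElem?_set_ne (by omega : j ≠ m)]
        have hscanj : scanL nums (nval nums j) j = (i : Int) :=
          scanL_eq_of nums (nval nums j) j i (by omega)
            (fun k hk hk' => hnos j (List.mem_cons_self ..) k (by omega) hk')
            (by simpa [nval] using hpop)
        obtain ⟨c1, c2, c3, c4, c5, c6, c7⟩ :=
          ih (left.set j (i : Int))
            (List.pairwise_cons.mp hsorted).2
            (fun a ha => hlb a (List.mem_cons_of_mem _ ha))
            (fun a ha => hnos a (List.mem_cons_of_mem _ ha))
            (by simpa using hlen)
            (by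
              intro m hm hm' hmst
              by_cases hmj : m = j
              · subst hmj
                rw [hset_self, hscanj]
              · rw [hset_other m hmj]
                exact hdone m hm hm' (by simp [hmj, hmst])
            )
            (by
              intro a ha
              rw [hset_other a (fun h => absurd (h ▸ ha) (fun hmem => lt_irrefl j (hjst j hmem)))]
              exact hin a (List.mem_cons_of_mem _ ha))
            (by
              intro m hm
              rw [hset_other m (by omega)]
              exact hfresh m hm)
        refine ⟨c1.trans (List.suffix_cons j st), ?_, c3, c4, c5, c6, c7⟩
        intro a ha hanot
        rcases List.mem_cons.mp ha with h | h
        · subst h; simpa [nval] using hpop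
        · exact c2 a h hanot
      · have hstep : popL nums i (j :: st) left = (j :: st, left) := by
          simp only [popL, if_neg hpop]
        rw [hstep]
        refine ⟨List.suffix_refl _, ?_, ?_, hlen, hdone, hin, hfresh⟩
        · intro a ha hanot; exact absurd ha hanot
        · intro a ha
          rcases List.mem_cons.mp ha with h | h
          · subst h; simpa [nval] using not_lt.mp hpop
          · calc nval nums a ≤ nval nums j := hnos a ha j (by omega) (hjst a h)
              _ ≤ nval nums i := by simpa [nval] using not_lt.mp hpop

theorem goodL_final (nums : List Int) (st : List Nat) (left : List Int)
    (h : GoodL nums 0 st left) :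
    ∀ j, j < nums.length → left.getD j (-1) = scanL nums (nval nums j) j := by
  intro j hj
  by_cases hmem : j ∈ st
  · rw [h.inStack j hmem,
      scanL_eq_neg nums (nval nums j) j (fun k hk => h.noSmaller j hmem k (by omega) hk)]
  · exact h.done j (by omega) hj hmem

theorem goodL_step (nums : List Int) (i : Nat) (st : List Nat) (left : List Int)
    (h : GoodL nums (i + 1) st left) (hi : i < nums.length) :
    GoodL nums i (i :: (popL nums i st left).1) (popL nums i st left).2 := by
  obtain ⟨c1, c2, c3, c4, c5, c6, c7⟩ :=
    popL_spec nums i hi st left h.sorted h.lb h.noSmaller h.len h.done h.inStack h.fresh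
  have hsub : ∀ a ∈ (popL nums i st left).1, a ∈ st := fun a ha => c1.subset ha
  refine ⟨?_, ?_, ?_, ?_, c4, ?_, ?_, ?_⟩
  · refine List.pairwise_cons.mpr ⟨fun a ha => ?_, h.sorted.sublist c1.sublist⟩
    have := (h.lb a (hsub a ha)).1; omega
  · intro a ha
    rcases List.mem_cons.mp ha with rfl | hh
    · exact ⟨le_refl _, hi⟩
    · have := h.lb a (hsub a hh); omega
  · intro j hj k hk hk'
    rcases List.mem_cons.mp hj with rfl | hh
    · omega
    · by_cases hki : k = i
      · subst hki; exact c3 j hh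
      · exact h.noSmaller j (hsub j hh) k (by omega) hk'
  · intro j hj hj' hprop
    by_cases hji : j = i
    · subst hji; exact List.mem_cons_self ..
    · have hji' : i + 1 ≤ j := by omega
      have hst : j ∈ st := h.complete j hji' hj' (fun k h1 h2 => hprop k (by omega) h2)
      by_cases hq : j ∈ (popL nums i st left).1
      · exact List.mem_cons_of_mem _ hq
      · exact absurd (hprop i (le_refl _) (by omega)) (not_le.mpr (c2 j hst hq))
  · intro j hj hj' hnot
    have hji : j ≠ i := fun hh => hnot (hh ▸ List.mem_cons_self ..)
    exact c5 j (by omega) hj' (fun hh => hnot (List.mem_cons_of_mem _ hh))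
  · intro j hj
    rcases List.mem_cons.mp hj with rfl | hh
    · exact c7 j (by omega)
    · exact c6 j hh
  · intro j hj
    exact c7 j (by omega)

-- the fold lemmas ----------------------------------------------------------
theorem passR_good (nums : List Int) :
    GoodR nums nums.length
      (((List.range nums.length).foldl
        (fun (p : List Nat × List Nat) i =>
          let q := popR nums i p.1 p.2
          (i :: q.1, q.2))
        ([], List.replicate nums.length nums.length)).1)
      (((List.range nums.length).foldl
        (fun (p : List Nat × List Nat) i =>
          let q := popR nums i p.1 p.2
          (i :: q.1, q.2))
        ([], List.replicate nums.length nums.length)).2) := by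
  suffices H : ∀ i, i ≤ nums.length →
      GoodR nums i
        (((List.range i).foldl
          (fun (p : List Nat × List Nat) i =>
            let q := popR nums i p.1 p.2
            (i :: q.1, q.2))
          ([], List.replicate nums.length nums.length)).1)
        (((List.range i).foldl
          (fun (p : List Nat × List Nat) i =>
            let q := popR nums i p.1 p.2
            (i :: q.1, q.2))
          ([], List.replicate nums.length nums.length)).2) by
    exact H nums.length (le_refl _)
  intro i hin
  induction i with
  | zero =>
      refine ⟨List.Pairwise.nil, by simp, by simp, by omega, by simp, by omega, by simp, ?_⟩
      intro j _ hj
      simp [List.getD, hj]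
  | succ i ih =>
      rw [List.range_succ, List.foldl_append]
      exact goodR_step nums i _ _ (ih (by omega)) (by omega)

theorem passL_good (nums : List Int) :
    GoodL nums 0
      (((List.range nums.length).reverse.foldl
        (fun (p : List Nat × List Int) i =>
          let q := popL nums i p.1 p.2
          (i :: q.1, q.2))
        ([], List.replicate nums.length (-1))).1)
      (((List.range nums.length).reverse.foldl
        (fun (p : List Nat × List Int) i =>
          let q := popL nums i p.1 p.2
          (i :: q.1, q.2))
        ([], List.replicate nums.length (-1))).2) := by
  suffices H : ∀ i, i ≤ nums.length → ∀ st left, GoodL nums i st left →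
      GoodL nums 0
        (((List.range i).reverse.foldl
          (fun (p : List Nat × List Int) i =>
            let q := popL nums i p.1 p.2
            (i :: q.1, q.2))
          (st, left)).1)
        (((List.range i).reverse.foldl
          (fun (p : List Nat × List Int) i =>
            let q := popL nums i p.1 p.2
            (i :: q.1, q.2))
          (st, left)).2) by
    refine H nums.length (le_refl _) [] (List.replicate nums.length (-1))
      ⟨List.Pairwise.nil, by simp, by simp, by intro j hj hj' _; omega, by simp,
        by intro j hj hj' _; omega, by simp, ?_⟩
    intro j _
    rcases Nat.lt_or_ge j nums.length with h | h
    · simp [List.getD, h]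
    · simp [List.getD, Nat.not_lt.mpr h]
  intro i
  induction i with
  | zero =>
      intro _ st left h
      simpa using h
  | succ i ih =>
      intro hin st left h
      rw [List.range_succ, List.reverse_append]
      simp only [List.reverse_cons, List.reverse_nil, List.nil_append, List.singleton_append,
        List.foldl_cons]
      exact ih (by omega) _ _ (goodL_step nums i st left h (by omega))

-- ===== VERDICT (by name: the statement is the Claim_ definition above) =====
theorem maxSumMinProduct_spec : Claim_equal_maxSumMinProduct := by
  unfold Claim_equal_maxSumMinProduct
  intro nums _
  unfold Spec_maxSumMinProduct
  have hR := goodR_final nums _ _ (passR_good nums)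
  have hL := goodL_final nums _ _ (passL_good nums)
  simp only [maxSumMinProduct, maxSumMinProduct_alt]
  congr 1
  apply PySem.List.foldl_congr_mem
  intro acc i hi
  have hi' : i < nums.length := List.mem_range.mp hi
  rw [hR i hi', hL i hi']
  simp [nval]
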